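-- pv_equiv track=rewrite | github.com/d1zm4as/CodeWars | Python/sort_out_men_from_boys.py | men_from_boys
-- ===== SOURCE A (Python) =====
-- def men_from_boys(arr):
--     listae = []
--     listai = []
--     for x in set(arr):
--         if x %2==0:
--             listae.append(x)
--         else:
--             listai.append(x)
--     listai = sorted(listai,reverse=True)
--     listae = sorted(listae)
--     return listae+listai
-- ===== SOURCE B (Python) =====
-- def men_from_boys(arr):
--     # hand-written merge sort on the key (parity, value-or-negated-value),
--     # dropping duplicates during the merge; no set(), no library sort, no partition
--     def key(x):
--         return (x % 2, x if x % 2 == 0 else -x)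
--
--     def merge(a, b):
--         out = []
--         i = j = 0
--         while i < len(a) and j < len(b):
--             ka, kb = key(a[i]), key(b[j])
--             if ka < kb:
--                 out.append(a[i]); i += 1
--             elif kb < ka:
--                 out.append(b[j]); j += 1
--             else:  # equal keys means equal elements: keep one
--                 out.append(a[i]); i += 1; j += 1
--         return out + a[i:] + b[j:]
--
--     def srt(lst):
--         if len(lst) <= 1:
--             return lst
--         m = len(lst) // 2
--         return merge(srt(lst[:m]), srt(lst[m:]))
--
--     return srt(arr)
-- ===== Notes on version B (the rewrite author's own statement) =====
-- stated objective: alternative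
-- what changed: B replaces A's set()-split-then-two-library-sorts with a hand-written merge sort over a single injective key (parity, then value for evens / negated value for odds) that eliminates duplicates inside the merge step.
import Mathlib
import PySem

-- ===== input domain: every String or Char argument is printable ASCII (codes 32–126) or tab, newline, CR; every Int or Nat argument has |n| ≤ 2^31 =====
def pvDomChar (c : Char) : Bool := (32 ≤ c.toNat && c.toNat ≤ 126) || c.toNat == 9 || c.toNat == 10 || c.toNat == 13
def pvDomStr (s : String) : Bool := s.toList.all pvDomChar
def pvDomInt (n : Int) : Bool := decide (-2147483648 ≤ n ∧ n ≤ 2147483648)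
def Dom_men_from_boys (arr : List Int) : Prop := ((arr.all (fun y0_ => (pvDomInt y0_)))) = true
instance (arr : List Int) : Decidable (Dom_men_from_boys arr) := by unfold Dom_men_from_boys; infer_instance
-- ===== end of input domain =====

-- B replaces A's set-split-plus-two-library-sorts with a hand-written duplicate-dropping
-- merge sort on an injective parity key; return values proved equal (objective: alternative).

-- ===== PORT A =====
-- A iterates over set(arr) splitting into evens/odds, then sorts each half.
-- (Python's set iteration order is not modelled; both halves are sorted afterwards,
-- so the return value does not depend on it.)
def men_from_boys (arr : List Int) : List Int :=
  let pair := (PySem.Set.ofList arr).foldl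
    (fun (acc : List Int × List Int) x =>
      if PySem.Int.mod x 2 == 0 then (acc.1 ++ [x], acc.2) else (acc.1, acc.2 ++ [x]))
    ([], [])
  let listai := PySem.List.sorted pair.2 (fun x => x) true
  let listae := PySem.List.sorted pair.1 (fun x => x) false
  listae ++ listai

-- ===== PORT B =====
-- key(x) = (x % 2, x if x % 2 == 0 else -x)
def pvKey (x : Int) : Int × Int :=
  (PySem.Int.mod x 2, if PySem.Int.mod x 2 == 0 then x else -x)

-- Python tuple comparison key(a) < key(b), lexicographic
def pvKeyLtb (a b : Int) : Bool :=
  decide ((pvKey a).1 < (pvKey b).1 ∨ ((pvKey a).1 = (pvKey b).1 ∧ (pvKey a).2 < (pvKey b).2))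

-- the while loop over indices i, j, rendered as the standard head recursion;
-- 'out + a[i:] + b[j:]' is the two exhaustion cases
def pvMerge : List Int → List Int → List Int
  | [], b => b
  | a, [] => a
  | x :: xs, y :: ys =>
    if pvKeyLtb x y then x :: pvMerge xs (y :: ys)
    else if pvKeyLtb y x then y :: pvMerge (x :: xs) ys
    else x :: pvMerge xs ys
termination_by a b => a.length + b.length

def pvSrt (lst : List Int) : List Int :=
  if lst.length ≤ 1 then lst
  else pvMerge (pvSrt (lst.take (lst.length / 2))) (pvSrt (lst.drop (lst.length / 2)))
termination_by lst.length
decreasing_by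
  · simp only [List.length_take]; omega
  · simp only [List.length_drop]; omega

def men_from_boys_alt (arr : List Int) : List Int := pvSrt arr

-- ===== PRECONDITION & SPEC =====
def Spec_men_from_boys (arr : List Int) (out : List Int) : Prop := out = men_from_boys_alt arr
instance (arr : List Int) (out : List Int) : Decidable (Spec_men_from_boys arr out) := by unfold Spec_men_from_boys; infer_instance

-- ===== CLAIM =====
def Claim_equal_men_from_boys : Prop := ∀ (arr : List Int), Dom_men_from_boys arr → Spec_men_from_boys arr (men_from_boys arr)

-- ===== LEMMAS AND PROOFS =====

-- the strict key order as a relation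
def pvR (a b : Int) : Prop := pvKeyLtb a b = true

theorem pvR_def (a b : Int) :
    pvR a b ↔ ((pvKey a).1 < (pvKey b).1 ∨ ((pvKey a).1 = (pvKey b).1 ∧ (pvKey a).2 < (pvKey b).2)) := by
  simp [pvR, pvKeyLtb]

theorem pv_mod_two (x : Int) : PySem.Int.mod x 2 = x % 2 :=
  PySem.Int.mod_eq_emod_of_pos (by norm_num)

theorem pvKey_even {x : Int} (h : x % 2 = 0) : pvKey x = (0, x) := by
  simp [pvKey, pv_mod_two, h]

theorem pvKey_odd {x : Int} (h : x % 2 = 1) : pvKey x = (1, -x) := by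
  simp [pvKey, pv_mod_two, h]

theorem pvKey_inj {a b : Int} (h : pvKey a = pvKey b) : a = b := by
  rcases Int.emod_two_eq a with ha | ha <;> rcases Int.emod_two_eq b with hb | hb <;>
    simp [pvKey, pv_mod_two, ha, hb, Prod.ext_iff] at h <;> omega

theorem pvR_trans {a b c : Int} (h1 : pvR a b) (h2 : pvR b c) : pvR a c := by
  rw [pvR_def] at *; omega

theorem pvR_irrefl (a : Int) : ¬ pvR a a := by rw [pvR_def]; omega

theorem pvR_total {a b : Int} (hne : a ≠ b) : pvR a b ∨ pvR b a := by
  rw [pvR_def, pvR_def]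
  by_contra h
  exact hne (pvKey_inj (Prod.ext_iff.2 ⟨by omega, by omega⟩))

theorem pvR_eq_of_not {a b : Int} (h1 : ¬ pvR a b) (h2 : ¬ pvR b a) : a = b := by
  by_contra hne; rcases pvR_total hne with h | h <;> [exact h1 h; exact h2 h]

-- membership through pvMerge
theorem pv_mem_merge (z : Int) (a b : List Int) :
    z ∈ pvMerge a b ↔ z ∈ a ∨ z ∈ b := by
  fun_induction pvMerge a b with
  | case1 b => simp
  | case2 a _ => simp
  | case3 x xs y ys h ih => simp [ih]; tauto
  | case4 x xs y ys h h' ih => simp [ih]; tauto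
  | case5 x xs y ys h h' ih =>
    have hxy : x = y := pvR_eq_of_not (by simpa [pvR] using h) (by simpa [pvR] using h')
    simp [ih, hxy]; tauto

-- merge preserves strict key-sortedness
theorem pv_merge_pairwise {a b : List Int}
    (ha : a.Pairwise pvR) (hb : b.Pairwise pvR) : (pvMerge a b).Pairwise pvR := by
  fun_induction pvMerge a b with
  | case1 b => exact hb
  | case2 a _ => exact ha
  | case3 x xs y ys h ih =>
    rw [List.pairwise_cons] at ha
    refine List.pairwise_cons.2 ⟨?_, ih ha.2 hb⟩
    intro z hz
    rcases (pv_mem_merge z _ _).1 hz with hz | hz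
    · exact ha.1 z hz
    · rcases List.mem_cons.1 hz with rfl | hz
      · exact h
      · exact pvR_trans h ((List.pairwise_cons.1 hb).1 z hz)
  | case4 x xs y ys h h' ih =>
    rw [List.pairwise_cons] at hb
    refine List.pairwise_cons.2 ⟨?_, ih ha hb.2⟩
    intro z hz
    rcases (pv_mem_merge z _ _).1 hz with hz | hz
    · rcases List.mem_cons.1 hz with rfl | hz
      · exact h'
      · exact pvR_trans h' ((List.pairwise_cons.1 ha).1 z hz)
    · exact hb.1 z hz
  | case5 x xs y ys h h' ih =>
    have hxy : x = y := pvR_eq_of_not (by simpa [pvR] using h) (by simpa [pvR] using h')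
    rw [List.pairwise_cons] at ha hb
    refine List.pairwise_cons.2 ⟨?_, ih ha.2 hb.2⟩
    intro z hz
    rcases (pv_mem_merge z _ _).1 hz with hz | hz
    · exact ha.1 z hz
    · exact hxy ▸ hb.1 z hz

theorem pv_srt_pairwise (lst : List Int) : (pvSrt lst).Pairwise pvR := by
  fun_induction pvSrt lst with
  | case1 lst h =>
    match lst, h with
    | [], _ => simp
    | [x], _ => simp
  | case2 lst h ih1 ih2 => exact pv_merge_pairwise ih1 ih2

theorem pv_mem_srt (z : Int) (lst : List Int) : z ∈ pvSrt lst ↔ z ∈ lst := by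
  fun_induction pvSrt lst with
  | case1 lst h => rfl
  | case2 lst h ih1 ih2 =>
    rw [pv_mem_merge, ih1, ih2, ← List.mem_append, List.take_append_drop]

-- ==== A's side: A equals the canonical list C = evens of sorted set ++ odds of reversed sorted set ====

def pvEvenb (x : Int) : Bool := PySem.Int.mod x 2 == 0

def pvC (arr : List Int) : List Int :=
  let s := PySem.List.sorted (PySem.Set.ofList arr) (fun x => x) false
  s.filter pvEvenb ++ s.reverse.filter (fun x => !pvEvenb x)

-- A's single loop with two append accumulators is a pair of filters.
theorem pv_split_fold (l : List Int) (a b : List Int) :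
    l.foldl (fun (acc : List Int × List Int) x =>
        if PySem.Int.mod x 2 == 0 then (acc.1 ++ [x], acc.2) else (acc.1, acc.2 ++ [x])) (a, b)
      = (a ++ l.filter pvEvenb, b ++ l.filter (fun x => !pvEvenb x)) := by
  induction l generalizing a b with
  | nil => simp only [List.foldl_nil, List.filter_nil, List.append_nil]
  | cons x t ih =>
    rw [List.foldl_cons]
    cases h : (PySem.Int.mod x 2 == 0) with
    | true =>
      simp only [pvEvenb, ih, List.filter_cons, h, Bool.not_true, if_true,
        Bool.false_eq_true, if_false, List.append_assoc, List.singleton_append]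
    | false =>
      simp only [pvEvenb, Bool.false_eq_true, if_false, ih, List.filter_cons, h, Bool.not_false,
        if_true, List.append_assoc, List.singleton_append]

theorem pv_sorted_filter (arr : List Int) (p : Int → Bool) :
    PySem.List.sorted ((PySem.Set.ofList arr).filter p) (fun x => x) false
      = (PySem.List.sorted (PySem.Set.ofList arr) (fun x => x) false).filter p := by
  apply PySem.List.sorted_eq_of_perm_of_pairwise_lt
  · exact ((PySem.List.sorted_perm _ _ _).filter p)
  · exact (PySem.List.sorted_ofList_pairwise_lt arr).sublist List.filter_sublist

theorem pv_sorted_rev_filter (arr : List Int) (p : Int → Bool) :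
    PySem.List.sorted ((PySem.Set.ofList arr).filter p) (fun x => x) true
      = (PySem.List.sorted (PySem.Set.ofList arr) (fun x => x) false).reverse.filter p := by
  rw [List.filter_reverse]
  apply PySem.List.sorted_rev_eq_of_perm_of_pairwise_gt
  · exact (List.reverse_perm _).trans ((PySem.List.sorted_perm _ _ _).filter p)
  · exact (List.pairwise_reverse).mpr
      ((PySem.List.sorted_ofList_pairwise_lt arr).sublist List.filter_sublist)

theorem pv_A_eq_C (arr : List Int) : men_from_boys arr = pvC arr := by
  unfold men_from_boys pvC
  simp only []
  rw [pv_split_fold]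
  simp only [List.nil_append, pv_sorted_filter, pv_sorted_rev_filter]

-- ==== C is strictly key-sorted, nodup, with the same members as arr ====

theorem pv_odd_mod {a : Int} (ha : pvEvenb a = false) : a % 2 = 1 := by
  simp only [pvEvenb, pv_mod_two] at ha
  rcases Int.emod_two_eq a with h | h
  · simp [h] at ha
  · exact h

theorem pvR_of_lt_even {a b : Int} (hab : a < b)
    (ha : pvEvenb a = true) (hb : pvEvenb b = true) : pvR a b := by
  simp only [pvEvenb, pv_mod_two, beq_iff_eq] at ha hb
  rw [pvR_def, pvKey_even ha, pvKey_even hb]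
  exact Or.inr ⟨rfl, hab⟩

theorem pvR_of_gt_odd {a b : Int} (hab : b < a)
    (ha : pvEvenb a = false) (hb : pvEvenb b = false) : pvR a b := by
  rw [pvR_def, pvKey_odd (pv_odd_mod ha), pvKey_odd (pv_odd_mod hb)]
  exact Or.inr ⟨rfl, by omega⟩

theorem pvR_even_odd {a b : Int} (ha : pvEvenb a = true) (hb : pvEvenb b = false) : pvR a b := by
  simp only [pvEvenb, pv_mod_two, beq_iff_eq] at ha
  rw [pvR_def, pvKey_even ha, pvKey_odd (pv_odd_mod hb)]
  exact Or.inl (by norm_num)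

theorem pv_C_pairwise (arr : List Int) : (pvC arr).Pairwise pvR := by
  unfold pvC
  simp only []
  rw [List.pairwise_append]
  have hs := PySem.List.sorted_ofList_pairwise_lt arr
  refine ⟨?_, ?_, ?_⟩
  · exact (hs.sublist List.filter_sublist).imp_of_mem
      (fun hma hmb hlt => pvR_of_lt_even hlt (List.of_mem_filter hma) (List.of_mem_filter hmb))
  · exact (((List.pairwise_reverse).2 hs).sublist List.filter_sublist).imp_of_mem
      (fun hma hmb hlt => pvR_of_gt_odd hlt (by simpa using List.of_mem_filter hma)
        (by simpa using List.of_mem_filter hmb))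
  · intro a hma b hmb
    exact pvR_even_odd (List.of_mem_filter hma) (by simpa using List.of_mem_filter hmb)

theorem pv_mem_C (z : Int) (arr : List Int) : z ∈ pvC arr ↔ z ∈ arr := by
  unfold pvC
  cases he : pvEvenb z <;>
    simp [List.mem_filter, PySem.List.mem_sorted, PySem.Set.mem_ofList, he]

-- nodup from strict sortedness
theorem pv_nodup_of_pairwise {l : List Int} (h : l.Pairwise pvR) : l.Nodup :=
  h.imp (fun hr => by rintro rfl; exact pvR_irrefl _ hr)

-- ===== VERDICT =====
theorem men_from_boys_spec : Claim_equal_men_from_boys := by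
  intro arr _
  unfold Spec_men_from_boys men_from_boys_alt
  rw [pv_A_eq_C]
  have hperm : (pvC arr).Perm (pvSrt arr) := by
    rw [List.perm_ext_iff_of_nodup (pv_nodup_of_pairwise (pv_C_pairwise arr))
      (pv_nodup_of_pairwise (pv_srt_pairwise arr))]
    intro z
    rw [pv_mem_C, pv_mem_srt]
  exact List.Perm.eq_of_pairwise
    (fun a b _ _ h1 h2 => absurd (pvR_trans h1 h2) (pvR_irrefl a))
    (pv_C_pairwise arr) (pv_srt_pairwise arr) hperm
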